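-- pv_equiv track=rewrite | github.com/josecatela/sgcodewars | day26/day26.py | Jose_Catela_day26
-- ===== SOURCE A (Python) =====
-- def Jose_Catela_day26(chars, n):
--     spaces = n - 1
--     tree = ''
--     pos = 0
--     npos = len(chars)
--     for k in range(n):
--         tree += ' ' * spaces
--         spaces -= 1
--         for j in range(k+1):
--             tree += chars[pos]
--             pos += 1
--             if pos == npos:
--                 pos = 0
--             if j != k:
--                 tree += ' '
--         tree += '\n'
--     base_size = n // 3
--     for k in range(base_size):
--         tree += ' ' * ( n - 1)
--         tree += '|'
--         if k != base_size - 1: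
--             tree += '\n'
--     return(tree)
-- ===== SOURCE B (Python) =====
-- def Jose_Catela_day26(chars, n):
--     if n <= 0:
--         return ''
--     total = n * (n + 1) // 2
--     stream = [chars[i % len(chars)] for i in range(total)]
--     rows = []
--     for k in range(n):
--         start = k * (k + 1) // 2
--         rows.append(' ' * (n - 1 - k) + ' '.join(stream[start:start + k + 1]) + '\n')
--     trunk = '\n'.join([' ' * (n - 1) + '|'] * (n // 3))
--     return ''.join(rows) + trunk
-- ===== Notes on version B (the rewrite author's own statement) =====
-- stated objective: alternative
-- what changed: Replaces the single running pos counter threaded through nested concatenating loops with a precomputed cycled character stream partitioned into rows via closed-form triangular start indices k*(k+1)//2, rows built by join and the trunk by a single '\n'.join of replicated lines.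
import Mathlib
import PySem

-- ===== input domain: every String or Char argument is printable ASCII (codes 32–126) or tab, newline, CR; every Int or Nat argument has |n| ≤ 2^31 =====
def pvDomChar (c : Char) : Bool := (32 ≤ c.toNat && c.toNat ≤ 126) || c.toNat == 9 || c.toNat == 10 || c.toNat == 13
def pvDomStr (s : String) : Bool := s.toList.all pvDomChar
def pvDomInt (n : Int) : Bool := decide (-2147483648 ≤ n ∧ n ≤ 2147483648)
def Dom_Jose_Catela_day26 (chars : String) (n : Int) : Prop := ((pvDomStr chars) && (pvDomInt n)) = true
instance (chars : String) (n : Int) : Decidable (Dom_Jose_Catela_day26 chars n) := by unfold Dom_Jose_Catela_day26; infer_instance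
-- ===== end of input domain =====

-- B replaces A's running cyclic position counter and interleaved string concatenation by a
-- precomputed cycled character stream cut into rows at closed-form triangular start indices,
-- rows and trunk assembled with joins (alternative decomposition, same asymptotic cost).


-- ===== PORT A =====
def Jose_Catela_day26 (chars : String) (n : Int) : String :=
  let cs := chars.toList
  let npos : Int := (cs.length : Int)
  let st :=
    (PySem.List.pyRange 0 n 1).foldl (fun (st : List Char × Int × Int) k =>
      let tree := st.1 ++ List.replicate st.2.1.toNat ' '
      let spaces := st.2.1 - 1
      let inner :=
        (PySem.List.pyRange 0 (k + 1) 1).foldl (fun (st2 : List Char × Int) j =>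
          let tree := st2.1 ++ [PySem.List.pyGetD cs st2.2 ' ']
          let pos := st2.2 + 1
          let pos := if pos = npos then 0 else pos
          let tree := if j ≠ k then tree ++ [' '] else tree
          (tree, pos)) (tree, st.2.2)
      (inner.1 ++ ['\n'], spaces, inner.2)) ([], n - 1, 0)
  let base : Int := PySem.Int.floordiv n 3
  let tree :=
    (PySem.List.pyRange 0 base 1).foldl (fun (tree : List Char) k =>
      let tree := tree ++ List.replicate (n - 1).toNat ' ' ++ ['|']
      if k ≠ base - 1 then tree ++ ['\n'] else tree) st.1
  String.ofList tree

-- ===== PORT B =====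
def Jose_Catela_day26_alt (chars : String) (n : Int) : String :=
  if n ≤ 0 then "" else
  let cs := chars.toList
  let len : Int := (cs.length : Int)
  let total : Int := PySem.Int.floordiv (n * (n + 1)) 2
  let stream := (PySem.List.pyRange 0 total 1).map
    (fun i => PySem.List.pyGetD cs (PySem.Int.mod i len) ' ')
  let rows := (PySem.List.pyRange 0 n 1).map (fun k =>
    let start := PySem.Int.floordiv (k * (k + 1)) 2
    List.replicate (n - 1 - k).toNat ' ' ++
      PySem.Chars.join [' ']
        ((PySem.List.slice stream (some start) (some (start + k + 1))).map (fun c => [c])) ++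
      ['\n'])
  let trunk := PySem.Chars.join ['\n']
    (List.replicate (PySem.Int.floordiv n 3).toNat (List.replicate (n - 1).toNat ' ' ++ ['|']))
  String.ofList (rows.flatten ++ trunk)

-- ===== PRECONDITION & SPEC =====
-- Pre_ excludes only chars = "" with n > 0, where A raises IndexError (B raises too).
def Pre_Jose_Catela_day26 (chars : String) (n : Int) : Prop := n ≤ 0 ∨ chars ≠ ""
instance (chars : String) (n : Int) : Decidable (Pre_Jose_Catela_day26 chars n) := by
  unfold Pre_Jose_Catela_day26; infer_instance
def pvWitness_Jose_Catela_day26 : String × Int := ("ab", 5)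

def Spec_Jose_Catela_day26 (chars : String) (n : Int) (out : String) : Prop := out = Jose_Catela_day26_alt chars n
instance (chars : String) (n : Int) (out : String) : Decidable (Spec_Jose_Catela_day26 chars n out) := by unfold Spec_Jose_Catela_day26; infer_instance

-- ===== CLAIM (what is proved, stated in full; the proofs are below) =====
def Claim_equal_Jose_Catela_day26 : Prop := ∀ (chars : String) (n : Int), Dom_Jose_Catela_day26 chars n → Pre_Jose_Catela_day26 chars n → Spec_Jose_Catela_day26 chars n (Jose_Catela_day26 chars n)

-- ===== LEMMAS AND PROOFS =====

def triNat : Nat → Nat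
  | 0 => 0
  | m + 1 => triNat m + (m + 1)

theorem triNat_eq (m : Nat) : triNat m = m * (m + 1) / 2 := by
  induction m with
  | zero => rfl
  | succ m ih =>
    obtain ⟨c, hc⟩ := Nat.even_mul_succ_self m
    have h2 : (m + 1) * (m + 1 + 1) = m * (m + 1) + 2 * (m + 1) := by ring
    simp only [triNat, ih]
    omega

theorem triNat_mono {a b : Nat} (h : a ≤ b) : triNat a ≤ triNat b := by
  induction b with
  | zero => have : a = 0 := by omega
            simp [this]
  | succ b ih =>
    rcases Nat.lt_or_ge a (b+1) with hb | hb
    · have := ih (by omega); simp only [triNat]; omega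
    · have ha : a = b + 1 := by omega
      simp [ha]

def cycList (cs : List Char) (p r : Nat) : List Char :=
  (List.range r).map (fun j => cs.getD ((p + j) % cs.length) ' ')

def spacedJoin (l : List Char) : List Char :=
  PySem.Chars.join [' '] (l.map (fun c => [c]))

theorem cycList_succ (cs : List Char) (p r : Nat) (hp : p < cs.length) :
    cycList cs p (r + 1) = cs.getD p ' ' :: cycList cs ((p + 1) % cs.length) r := by
  simp only [cycList, List.range_succ_eq_map, List.map_cons, List.map_map]
  congr 1
  · rw [Nat.add_zero, Nat.mod_eq_of_lt hp]
  · apply List.map_congr_left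
    intro j _
    simp only [Function.comp]
    rw [Nat.mod_add_mod]
    congr 2
    omega

theorem spacedJoin_cons (c : Char) (l : List Char) :
    spacedJoin (c :: l) = [c] ++ (if l = [] then [] else [' '] ++ spacedJoin l) := by
  cases l with
  | nil => simp [spacedJoin, PySem.Chars.join_singleton]
  | cons x xs =>
    simp only [spacedJoin, List.map_cons, PySem.Chars.join_cons_cons]
    simp

theorem inner_fold (cs : List Char) (hcs : cs ≠ []) (kk : Nat) :
    ∀ (r : Nat) (a : Int) (t : List Char) (p : Nat), p < cs.length →
      a + r = (kk : Int) + 1 →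
    (PySem.List.pyRange a ((kk : Int) + 1) 1).foldl
      (fun (st2 : List Char × Int) j =>
        let tree := st2.1 ++ [PySem.List.pyGetD cs st2.2 ' ']
        let pos := st2.2 + 1
        let pos := if pos = ((cs.length : Nat) : Int) then 0 else pos
        let tree := if j ≠ (kk : Int) then tree ++ [' '] else tree
        (tree, pos)) (t, (p : Int))
    = (t ++ spacedJoin (cycList cs p r), (((p + r) % cs.length : Nat) : Int)) := by
  have hL : 0 < cs.length := List.length_pos_iff.mpr hcs
  intro r
  induction r with
  | zero =>
    intro a t p hp ha
    rw [PySem.List.pyRange_one_eq_nil (by omega)]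
    simp [cycList, spacedJoin, PySem.Chars.join_nil, Nat.mod_eq_of_lt hp]
  | succ r ih =>
    intro a t p hp ha
    rw [PySem.List.pyRange_one_cons (by omega)]
    simp only [List.foldl_cons]
    have hget : PySem.List.pyGetD cs ((p : Nat) : Int) ' ' = cs.getD p ' ' := by
      simp [PySem.List.pyGetD_natCast]
    have hpos : (if ((p : Nat) : Int) + 1 = ((cs.length : Nat) : Int) then (0 : Int)
        else ((p : Nat) : Int) + 1) = (((p + 1) % cs.length : Nat) : Int) := by
      by_cases h : p + 1 = cs.length
      · rw [if_pos (by exact_mod_cast h), h, Nat.mod_self]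
        simp
      · have hlt : p + 1 < cs.length := by omega
        rw [if_neg (by exact_mod_cast h), Nat.mod_eq_of_lt hlt]
        push_cast; ring
    have hcond : (a ≠ (kk : Int)) ↔ (r ≠ 0) := by omega
    rw [hget, hpos]
    by_cases hr : r = 0
    · subst hr
      rw [if_neg (by omega)]
      rw [ih (a + 1) (t ++ [cs.getD p ' ']) ((p + 1) % cs.length)
        (Nat.mod_lt _ hL) (by omega)]
      simp only [Prod.mk.injEq]
      refine ⟨?_, ?_⟩
      · rw [cycList_succ cs p 0 hp, spacedJoin_cons]
        simp [cycList, spacedJoin, PySem.Chars.join_nil]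
      · rw [Nat.add_zero, Nat.mod_eq_of_lt (Nat.mod_lt _ hL)]
    · rw [if_pos (by omega)]
      rw [ih (a + 1) ((t ++ [cs.getD p ' ']) ++ [' ']) ((p + 1) % cs.length)
        (Nat.mod_lt _ hL) (by omega)]
      have hcyc : cycList cs ((p + 1) % cs.length) r ≠ [] := by
        simp [cycList]
        omega
      simp only [Prod.mk.injEq]
      refine ⟨?_, ?_⟩
      · rw [cycList_succ cs p r hp, spacedJoin_cons, if_neg hcyc]
        simp
      · rw [Nat.mod_add_mod]
        congr 2
        omega

def rowA (cs : List Char) (N k : Nat) : List Char :=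
  List.replicate (N - 1 - k) ' ' ++
    spacedJoin (cycList cs (triNat k % cs.length) (k + 1)) ++ ['\n']

theorem outer_fold (cs : List Char) (hcs : cs ≠ []) (N : Nat) :
    ∀ (m : Nat), m ≤ N →
    (PySem.List.pyRange 0 (m : Int) 1).foldl
      (fun (st : List Char × Int × Int) k =>
        let tree := st.1 ++ List.replicate st.2.1.toNat ' '
        let spaces := st.2.1 - 1
        let inner :=
          (PySem.List.pyRange 0 (k + 1) 1).foldl
            (fun (st2 : List Char × Int) j =>
              let tree := st2.1 ++ [PySem.List.pyGetD cs st2.2 ' ']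
              let pos := st2.2 + 1
              let pos := if pos = ((cs.length : Nat) : Int) then 0 else pos
              let tree := if j ≠ k then tree ++ [' '] else tree
              (tree, pos)) (tree, st.2.2)
        (inner.1 ++ ['\n'], spaces, inner.2)) ([], (N : Int) - 1, 0)
    = ((List.range m).flatMap (rowA cs N), (N : Int) - 1 - m,
        ((triNat m % cs.length : Nat) : Int)) := by
  have hL : 0 < cs.length := List.length_pos_iff.mpr hcs
  intro m
  induction m with
  | zero =>
    intro _
    rw [show ((0 : Nat) : Int) = 0 by norm_num, PySem.List.pyRange_one_eq_nil (by omega)]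
    simp [triNat, Nat.mod_eq_of_lt hL]
  | succ m ih =>
    intro hm
    rw [show ((m + 1 : Nat) : Int) = (m : Int) + 1 by push_cast; ring,
      PySem.List.pyRange_one_succ_right (by omega), List.foldl_append, ih (by omega)]
    simp only [List.foldl_cons, List.foldl_nil]
    rw [inner_fold cs hcs m (m + 1) 0
      ((List.range m).flatMap (rowA cs N) ++ List.replicate ((N : Int) - 1 - m).toNat ' ')
      (triNat m % cs.length) (Nat.mod_lt _ hL) (by push_cast; ring)]
    simp only [Prod.mk.injEq]
    refine ⟨?_, ?_, ?_⟩
    · rw [List.range_succ, List.flatMap_append, List.flatMap_singleton]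
      rw [rowA]
      have h1 : ((N : Int) - 1 - m).toNat = N - 1 - m := by omega
      rw [h1]
      simp [List.append_assoc]
    · omega
    · have : (triNat m % cs.length + (m + 1)) % cs.length
          = triNat (m + 1) % cs.length := by
        rw [Nat.mod_add_mod]; rfl
      rw [this]

theorem trunk_fold (u : List Char) (B : Nat) :
    ∀ (r : Nat) (a : Int) (t : List Char), a + r = (B : Int) →
    (PySem.List.pyRange a (B : Int) 1).foldl
      (fun (tree : List Char) k =>
        let tree := tree ++ u ++ ['|']
        if k ≠ (B : Int) - 1 then tree ++ ['\n'] else tree) t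
    = t ++ PySem.Chars.join ['\n'] (List.replicate r (u ++ ['|'])) := by
  intro r
  induction r with
  | zero =>
    intro a t ha
    rw [PySem.List.pyRange_one_eq_nil (by omega)]
    simp [PySem.Chars.join_nil]
  | succ r ih =>
    intro a t ha
    rw [PySem.List.pyRange_one_cons (by omega)]
    simp only [List.foldl_cons]
    by_cases hr : r = 0
    · subst hr
      rw [if_neg (by omega), ih (a + 1) (t ++ u ++ ['|']) (by omega)]
      simp [PySem.Chars.join_singleton, PySem.Chars.join_nil]
    · rw [if_pos (by omega), ih (a + 1) (t ++ u ++ ['|'] ++ ['\n']) (by omega)]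
      obtain ⟨r', rfl⟩ : ∃ r', r = r' + 1 := ⟨r - 1, by omega⟩
      rw [show List.replicate (r' + 1 + 1) (u ++ ['|'])
            = (u ++ ['|']) :: (u ++ ['|']) :: List.replicate r' (u ++ ['|']) by
          simp [List.replicate_succ],
        PySem.Chars.join_cons_cons, List.replicate_succ]
      simp [List.append_assoc]

theorem rowB_eq (cs : List Char) (hcs : cs ≠ []) (N k : Nat) (hk : k < N) :
    List.replicate ((N : Int) - 1 - (k : Int)).toNat ' ' ++
      PySem.Chars.join [' ']
        ((PySem.List.slice
            ((PySem.List.pyRange 0 (PySem.Int.floordiv ((N : Int) * ((N : Int) + 1)) 2) 1).map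
              (fun i => PySem.List.pyGetD cs (PySem.Int.mod i ((cs.length : Nat) : Int)) ' '))
            (some (PySem.Int.floordiv ((k : Int) * ((k : Int) + 1)) 2))
            (some (PySem.Int.floordiv ((k : Int) * ((k : Int) + 1)) 2 + (k : Int) + 1))).map
          (fun c => [c])) ++ ['\n']
    = rowA cs N k := by
  have hL : 0 < cs.length := List.length_pos_iff.mpr hcs
  have htwo : (2 : Int) = ((2 : Nat) : Int) := by norm_num
  have hTk : PySem.Int.floordiv ((k : Int) * ((k : Int) + 1)) 2 = ((triNat k : Nat) : Int) := by
    rw [show ((k : Int) * ((k : Int) + 1)) = ((k * (k + 1) : Nat) : Int) by push_cast; ring,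
      htwo, PySem.Int.floordiv_natCast, triNat_eq]
  have hTN : PySem.Int.floordiv ((N : Int) * ((N : Int) + 1)) 2 = ((triNat N : Nat) : Int) := by
    rw [show ((N : Int) * ((N : Int) + 1)) = ((N * (N + 1) : Nat) : Int) by push_cast; ring,
      htwo, PySem.Int.floordiv_natCast, triNat_eq]
  have hle : triNat k + (k + 1) ≤ triNat N := by
    have := triNat_mono (Nat.succ_le_of_lt hk)
    simpa [triNat] using this
  rw [hTk, hTN,
    show ((triNat k : Nat) : Int) + (k : Int) + 1 = ((triNat k : Nat) : Int) + ((k + 1 : Nat) : Int) by push_cast; ring,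
    PySem.List.slice_natCast_add]
  rw [PySem.List.pyRange_zero_nat, List.map_map]
  have hstream : (List.range (triNat N)).map
      ((fun i => PySem.List.pyGetD cs (PySem.Int.mod i ((cs.length : Nat) : Int)) ' ') ∘ (fun n : Nat => (n : Int)))
      = (List.range (triNat N)).map (fun i => cs.getD (i % cs.length) ' ') := by
    apply List.map_congr_left
    intro i _
    simp only [Function.comp]
    rw [PySem.Int.mod_natCast, PySem.List.pyGetD_natCast]
  rw [hstream, ← List.map_drop, ← List.map_take]
  rw [show List.drop (triNat k) (List.range (triNat N)) = List.range' (triNat k) (triNat N - triNat k) by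
    simp [List.range_eq_range', List.drop_range']]
  rw [List.range'_eq_map_range, ← List.map_take, List.take_range,
    show min (k + 1) (triNat N - triNat k) = k + 1 by omega]
  rw [rowA, show ((N : Int) - 1 - (k : Int)).toNat = N - 1 - k by omega]
  congr 2
  show PySem.Chars.join [' '] _ = spacedJoin _
  rw [spacedJoin, cycList, List.map_map, List.map_map, List.map_map]
  congr 1
  apply List.map_congr_left
  intro j _
  simp only [Function.comp]
  rw [Nat.mod_add_mod]

theorem main_thm (chars : String) (n : Int) (hpre : Pre_Jose_Catela_day26 chars n) :
    Jose_Catela_day26 chars n = Jose_Catela_day26_alt chars n := by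
  by_cases hn : n ≤ 0
  · have hbase : PySem.Int.floordiv n 3 ≤ 0 := by
      have := (PySem.Int.floordiv_lt_iff_lt_mul (a := n) (b := 3) (q := 1) (by omega)).2 (by omega)
      omega
    rw [Jose_Catela_day26, Jose_Catela_day26_alt, if_pos hn]
    simp only [PySem.List.pyRange_one_eq_nil hn, PySem.List.pyRange_one_eq_nil hbase,
      List.foldl_nil]
  · have hcs : chars.toList ≠ [] := by
      rcases hpre with h | h
      · omega
      · simpa [String.toList_eq_nil_iff] using h
    have hL : 0 < chars.toList.length := List.length_pos_iff.mpr hcs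
    obtain ⟨N, rfl⟩ : ∃ N : Nat, n = (N : Int) := ⟨n.toNat, by omega⟩
    have hN : 0 < N := by exact_mod_cast (by omega : (0:Int) < (N:Int))
    have htwo : (3 : Int) = ((3 : Nat) : Int) := by norm_num
    have hbase : PySem.Int.floordiv ((N : Int)) 3 = ((N / 3 : Nat) : Int) := by
      rw [htwo, PySem.Int.floordiv_natCast]
    rw [Jose_Catela_day26, Jose_Catela_day26_alt, if_neg hn]
    simp only []
    rw [outer_fold chars.toList hcs N N (le_refl N)]
    rw [hbase, trunk_fold (List.replicate ((N : Int) - 1).toNat ' ') (N / 3) (N / 3) 0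
      ((List.range N).flatMap (rowA chars.toList N)) (by omega)]
    rw [PySem.List.pyRange_zero_nat, List.map_map, List.flatten_eq_flatMap, List.flatMap_map]
    rw [Int.toNat_natCast]
    congr 1
    symm
    congr 1
    rw [List.flatMap_def, List.flatMap_def]
    refine congrArg List.flatten ?_
    apply List.map_congr_left
    intro k hk
    simp only [id, Function.comp]
    exact rowB_eq chars.toList hcs N k (List.mem_range.mp hk)

-- ===== VERDICT (by name: the statement is the Claim_ definition above) =====
theorem Jose_Catela_day26_spec : Claim_equal_Jose_Catela_day26 := by
  intro chars n _ hpre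
  unfold Spec_Jose_Catela_day26
  exact main_thm chars n hpre
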